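-- pv_equiv track=rewrite | github.com/pratik2358/functional_dep_checker_online | web_helpers.py | make_attribute_names
-- ===== SOURCE A (Python) =====
-- import string
--
-- def make_attribute_names(n: int) -> list[str]:
--     upper = list(string.ascii_uppercase)
--     lower = list(string.ascii_lowercase)
--     base = upper + lower
--     names = []
--     k = 0
--     while len(names) < n:
--         for sym in base:
--             if len(names) >= n:
--                 break
--             suffix = "" if k == 0 else str(k)
--             names.append(f"{sym}{suffix}")
--         k += 1
--     return names[:n]
-- ===== SOURCE B (Python) =====
-- import string
--
-- def make_attribute_names(n: int) -> list[str]: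
--     base = string.ascii_uppercase + string.ascii_lowercase
--     out = []
--     for i in range(n):
--         q, r = divmod(i, 52)
--         out.append(base[r] + ("" if q == 0 else str(q)))
--     return out
-- ===== Notes on version B (the rewrite author's own statement) =====
-- stated objective: simpler
-- what changed: Replaces the while-loop with a maintained k counter, inner symbol cycling with break guards, and a trailing slice by a single pass over range(n) that computes each name directly from its index via divmod(i, 52).
import Mathlib
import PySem

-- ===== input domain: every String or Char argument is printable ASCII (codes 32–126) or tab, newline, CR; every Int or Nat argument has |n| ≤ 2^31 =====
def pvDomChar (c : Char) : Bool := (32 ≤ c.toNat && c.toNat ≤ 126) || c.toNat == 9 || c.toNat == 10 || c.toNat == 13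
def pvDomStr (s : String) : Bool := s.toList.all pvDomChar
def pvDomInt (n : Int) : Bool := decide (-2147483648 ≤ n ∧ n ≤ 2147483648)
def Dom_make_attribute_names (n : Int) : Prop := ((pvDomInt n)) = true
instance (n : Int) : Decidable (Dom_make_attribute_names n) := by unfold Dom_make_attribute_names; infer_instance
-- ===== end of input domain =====

-- B replaces A's while-loop with its maintained k counter, inner symbol cycling with break guards and
-- trailing slice by one pass over range(n) computing each name directly from its index via divmod (simpler).

-- ===== PORT A =====
def pvUpper : List String :=
  ["A","B","C","D","E","F","G","H","I","J","K","L","M","N","O","P","Q","R","S","T","U","V","W","X","Y","Z"]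
def pvLower : List String :=
  ["a","b","c","d","e","f","g","h","i","j","k","l","m","n","o","p","q","r","s","t","u","v","w","x","y","z"]
def pvBase : List String := pvUpper ++ pvLower

-- `"" if k == 0 else str(k)`
def pvSuffix (k : Int) : String := if k = 0 then "" else PySem.Int.toStr k

-- the inner `for sym in base` loop with its `if len(names) >= n: break` guard
def pvInnerA (n : Int) (k : Int) : List String → List String → List String
  | [], names => names
  | sym :: rest, names =>
      if n ≤ (names.length : Int) then names
      else pvInnerA n k rest (names ++ [sym ++ pvSuffix k])

-- characterisation of the inner loop (stated here because pvOuterA's termination proof cites it)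
theorem pvInnerA_spec (syms : List String) : ∀ (names : List String) (n k : Int),
    pvInnerA n k syms names
      = names ++ ((syms.take (n - names.length).toNat).map (· ++ pvSuffix k)) := by
  induction syms with
  | nil => intro names n k; simp [pvInnerA]
  | cons sym rest ih =>
      intro names n k
      by_cases h : n ≤ (names.length : Int)
      · have h0 : (n - names.length).toNat = 0 := by omega
        simp [pvInnerA, h, h0]
      · have h1 : (n - names.length).toNat
            = (n - ((names ++ [sym ++ pvSuffix k]).length : Int)).toNat + 1 := by
          simp; omega
        simp only [pvInnerA, if_neg h, ih]
        rw [h1]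
        simp [List.take_succ_cons]

-- the outer `while len(names) < n` loop carrying the counter k
def pvOuterA (n : Int) (k : Int) (names : List String) : List String :=
  if h : (names.length : Int) < n then
    pvOuterA n (k + 1) (pvInnerA n k pvBase names)
  else names
termination_by (n - names.length).toNat
decreasing_by
  rw [pvInnerA_spec]
  have hb : pvBase.length = 52 := by decide
  simp [hb]
  omega

def make_attribute_names (n : Int) : List String :=
  PySem.List.slice (pvOuterA n 0 []) none (some n)   -- names[:n]

-- ===== PORT B =====
def pvBaseAlt : List String :=
  ["A","B","C","D","E","F","G","H","I","J","K","L","M","N","O","P","Q","R","S","T","U","V","W","X","Y","Z",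
   "a","b","c","d","e","f","g","h","i","j","k","l","m","n","o","p","q","r","s","t","u","v","w","x","y","z"]

def make_attribute_names_alt (n : Int) : List String :=
  (PySem.List.pyRange 0 n 1).map (fun i =>
    let q := PySem.Int.floordiv i 52
    let r := PySem.Int.mod i 52
    PySem.List.pyGetD pvBaseAlt r "" ++ (if q = 0 then "" else PySem.Int.toStr q))

-- ===== PRECONDITION & SPEC =====
def Spec_make_attribute_names (n : Int) (out : List String) : Prop := out = make_attribute_names_alt n
instance (n : Int) (out : List String) : Decidable (Spec_make_attribute_names n out) := by unfold Spec_make_attribute_names; infer_instance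

-- ===== CLAIM (what is proved, stated in full; the proofs are below) =====
def Claim_equal_make_attribute_names : Prop := ∀ (n : Int), Dom_make_attribute_names n → Spec_make_attribute_names n (make_attribute_names n)

-- ===== LEMMAS AND PROOFS =====

-- the name at index m; both ports are reduced to mapping pvName over an index range
def pvName (m : Nat) : String := pvBaseAlt.getD (m % 52) "" ++ pvSuffix ((m / 52 : Nat) : Int)

theorem pvAlt_eq (n : Int) :
    make_attribute_names_alt n = (List.range n.toNat).map pvName := by
  unfold make_attribute_names_alt
  by_cases hn : 0 ≤ n
  · obtain ⟨m, rfl⟩ : ∃ m : Nat, n = (m : Int) := ⟨n.toNat, (Int.toNat_of_nonneg hn).symm⟩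
    rw [PySem.List.pyRange_zero_natCast, List.map_map, Int.toNat_natCast]
    refine List.map_congr_left (fun k _ => ?_)
    simp only [Function.comp]
    rw [show ((52:Int) = ((52:Nat):Int)) by norm_num, PySem.Int.floordiv_natCast,
        PySem.Int.mod_natCast, PySem.List.pyGetD_natCast]
    simp [pvName, pvSuffix]
  · have h1 : PySem.List.pyRange 0 n 1 = [] := by simp [PySem.List.pyRange]; omega
    have h2 : n.toNat = 0 := by omega
    simp [h1, h2]

-- one inner pass starting at length 52*j produces the pvName segment from index 52*j on
theorem pvSeg (j m : Nat) (hm : m ≤ 52) :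
    (pvBase.take m).map (· ++ pvSuffix (j : Int))
      = (List.range' (52 * j) m).map pvName := by
  have hb : pvBase = pvBaseAlt := by decide
  apply List.ext_getElem
  · have : pvBaseAlt.length = 52 := by decide
    simp [hb, this]; omega
  · intro i h1 h2
    simp only [List.getElem_map, List.getElem_take, List.getElem_range']
    have hi : i < 52 := by simp [hb] at h1; omega
    have e1 : (52 * j + 1 * i) % 52 = i := by omega
    have e2 : (52 * j + 1 * i) / 52 = j := by omega
    rw [pvName, e1, e2, List.getD_eq_getElem _ _ (by rw [← hb]; exact hi.trans_le (by decide))]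
    simp [hb]

theorem pvOuter_spec (d : Nat) : ∀ (j : Nat) (n : Int), n ≤ 52 * j + d →
    pvOuterA n (j : Int) ((List.range (52 * j)).map pvName)
      = (List.range (max (52 * j) n.toNat)).map pvName := by
  induction d using Nat.strong_induction_on with
  | _ d ih =>
    intro j n hd
    rw [pvOuterA]
    by_cases h : (((List.range (52 * j)).map pvName).length : Int) < n
    · simp only [List.length_map, List.length_range] at h
      rw [dif_pos (by simpa using h), pvInnerA_spec]
      set m0 := (n - ((List.range (52 * j)).map pvName).length).toNat with hm0
      have hm0' : m0 = n.toNat - 52 * j := by simp [hm0]; omega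
      have hrange : ∀ b : Nat, List.range (52 * j + b) = List.range (52 * j) ++ List.range' (52 * j) b := by
        intro b
        rw [List.range_eq_range', List.range_eq_range', ← List.range'_append]
        simp
      by_cases hc : m0 ≤ 52
      · have hseg := pvSeg j m0 hc
        rw [hseg, ← List.map_append, ← hrange]
        have he : 52 * j + m0 = n.toNat := by omega
        rw [he, pvOuterA, dif_neg (by simp only [List.length_map, List.length_range]; omega)]
        have : max (52 * j) n.toNat = n.toNat := by omega
        rw [this]
      · have h52 : pvBase.length = 52 := by decide
        rw [List.take_of_length_le (by omega),
            show pvBase = pvBase.take 52 from (List.take_of_length_le (by omega)).symm,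
            pvSeg j 52 le_rfl, ← List.map_append, ← hrange,
            show (52 * j + 52) = 52 * (j + 1) by ring,
            show ((j : Int) + 1) = ((j + 1 : Nat) : Int) by push_cast; ring]
        have := ih (d - 52) (by omega) (j + 1) n (by push_cast at hd ⊢; omega)
        rw [this]
        have : max (52 * (j + 1)) n.toNat = max (52 * j) n.toNat := by omega
        rw [this]
    · rw [dif_neg (by simpa using h)]
      simp only [List.length_map, List.length_range] at h
      have : max (52 * j) n.toNat = 52 * j := by omega
      rw [this]

-- ===== VERDICT (by name: the statement is the Claim_ definition above) =====
theorem make_attribute_names_spec : Claim_equal_make_attribute_names := by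
  intro n _
  unfold Spec_make_attribute_names make_attribute_names
  have h0 := pvOuter_spec n.toNat 0 n (by omega)
  simp only [Nat.mul_zero, List.range_zero, List.map_nil, Int.natCast_zero, Nat.zero_max] at h0
  rw [h0, pvAlt_eq]
  by_cases hn : 0 ≤ n
  · rw [PySem.List.slice_to _ hn]
    exact List.take_of_length_le (by simp)
  · have h2 : n.toNat = 0 := by omega
    simp [h2, PySem.List.slice]
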